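-- pv_equiv track=rewrite | github.com/niqath/opensource | visaa_prep/DND.py | dnd
-- ===== SOURCE A (Python) =====
-- def dnd(n,m,a):
--     sum_divisible=0
--     sum_not_divisible=0
--
--     for num in a:
--         if num % m == 0:
--             sum_divisible += num
--         else:
--             sum_not_divisible += num
--     return sum_divisible-sum_not_divisible
-- ===== SOURCE B (Python) =====
-- def dnd(n, m, a):
--     if not a:
--         return 0
--     if len(a) == 1:
--         x = a[0]
--         return x if x % m == 0 else -x
--     mid = len(a) // 2
--     return dnd(n, m, a[:mid]) + dnd(n, m, a[mid:])
-- ===== Notes on version B (the rewrite author's own statement) =====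
-- stated objective: alternative
-- what changed: B replaces A's single linear scan with two branch accumulators by a divide-and-conquer recursion: each element contributes +x or -x, singletons are the base case, and halves of the list are solved recursively and added.
import Mathlib
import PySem

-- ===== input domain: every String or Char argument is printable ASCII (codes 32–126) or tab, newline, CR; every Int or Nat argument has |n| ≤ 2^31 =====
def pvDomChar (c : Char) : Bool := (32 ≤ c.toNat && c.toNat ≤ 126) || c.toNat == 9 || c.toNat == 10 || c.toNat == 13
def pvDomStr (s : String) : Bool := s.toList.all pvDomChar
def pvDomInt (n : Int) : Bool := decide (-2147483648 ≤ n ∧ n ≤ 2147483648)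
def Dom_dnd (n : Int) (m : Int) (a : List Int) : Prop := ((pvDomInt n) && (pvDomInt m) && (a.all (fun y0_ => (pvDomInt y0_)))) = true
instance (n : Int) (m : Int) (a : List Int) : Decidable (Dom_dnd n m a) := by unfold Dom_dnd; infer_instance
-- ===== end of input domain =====

-- B replaces A's linear two-accumulator scan by a divide-and-conquer recursion on list halves
-- (each element contributes +x or -x); objective: alternative.


-- ===== PORT A =====
def dnd (n : Int) (m : Int) (a : List Int) : Int :=
  let st := a.foldl (fun (st : Int × Int) num =>
    if PySem.Int.mod num m = 0 then (st.1 + num, st.2) else (st.1, st.2 + num)) (0, 0)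
  st.1 - st.2

-- ===== PORT B =====
def dnd_alt (n : Int) (m : Int) (a : List Int) : Int :=
  if h0 : a = [] then 0
  else if h1 : a.length = 1 then
    let x := PySem.List.pyGetD a 0 0   -- a[0]; in range since a ≠ []
    if PySem.Int.mod x m = 0 then x else -x
  else
    let mid := PySem.Int.floordiv (PySem.List.len a) 2
    dnd_alt n m (PySem.List.slice a none (some mid)) +
    dnd_alt n m (PySem.List.slice a (some mid) none)
termination_by a.length
decreasing_by
  · have hlen : 0 < a.length := List.length_pos_of_ne_nil h0
    have h : PySem.Int.floordiv (PySem.List.len a) 2 = ((a.length / 2 : Nat) : Int) := by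
      simp [PySem.List.len_eq]
    rw [h, PySem.List.slice_to_natCast]
    simp only [List.length_take]
    omega
  · have hlen : 0 < a.length := List.length_pos_of_ne_nil h0
    have h : PySem.Int.floordiv (PySem.List.len a) 2 = ((a.length / 2 : Nat) : Int) := by
      simp [PySem.List.len_eq]
    rw [h, PySem.List.slice_from_natCast]
    simp only [List.length_drop]
    omega

-- ===== PRECONDITION & SPEC =====
-- Pre_ excludes m = 0 with a nonempty list, where Python's '%' raises ZeroDivisionError in both A and B.
def Pre_dnd (n : Int) (m : Int) (a : List Int) : Prop := m ≠ 0 ∨ a = []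
instance (n : Int) (m : Int) (a : List Int) : Decidable (Pre_dnd n m a) := by unfold Pre_dnd; infer_instance
def pvWitness_dnd : Int × Int × List Int := (0, 3, [3, 4, 6, -5])

def Spec_dnd (n : Int) (m : Int) (a : List Int) (out : Int) : Prop := out = dnd_alt n m a
instance (n : Int) (m : Int) (a : List Int) (out : Int) : Decidable (Spec_dnd n m a out) := by unfold Spec_dnd; infer_instance

-- ===== CLAIM =====
def Claim_equal_dnd : Prop := ∀ (n : Int) (m : Int) (a : List Int), Dom_dnd n m a → Pre_dnd n m a → Spec_dnd n m a (dnd n m a)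

-- ===== LEMMAS AND PROOFS =====

-- Signed-sum characterisation shared by both proofs.
def signedSum (m : Int) (a : List Int) : Int :=
  (a.map (fun x => if PySem.Int.mod x m = 0 then x else -x)).sum

-- A's fold invariant: result = (start difference) + signed sum.
theorem dnd_foldl_inv (m : Int) (a : List Int) (s t : Int) :
    (a.foldl (fun (st : Int × Int) num =>
      if PySem.Int.mod num m = 0 then (st.1 + num, st.2) else (st.1, st.2 + num)) (s, t)).1
    - (a.foldl (fun (st : Int × Int) num =>
      if PySem.Int.mod num m = 0 then (st.1 + num, st.2) else (st.1, st.2 + num)) (s, t)).2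
    = s - t + signedSum m a := by
  induction a generalizing s t with
  | nil => simp [signedSum]
  | cons x xs ih =>
    by_cases h : PySem.Int.mod x m = 0 <;>
      simp [List.foldl_cons, signedSum, h, ih] <;> ring

-- B's divide-and-conquer computes the same signed sum.
-- Splitting the signed sum at a nonnegative slice point.
theorem signedSum_slice_split (m k : Int) (a : List Int) (hk : 0 ≤ k) :
    signedSum m (PySem.List.slice a none (some k)) +
      signedSum m (PySem.List.slice a (some k) none) = signedSum m a := by
  rw [PySem.List.slice_to a hk, PySem.List.slice_from a hk]
  simp only [signedSum]
  rw [← List.sum_append, ← List.map_append, List.take_append_drop]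

-- B's divide-and-conquer computes the same signed sum.
theorem dnd_alt_eq_signedSum (n m : Int) (a : List Int) :
    dnd_alt n m a = signedSum m a := by
  fun_induction dnd_alt n m a with
  | case1 => simp [signedSum]
  | case2 a h0 h1 xx h =>
    have hx : xx = PySem.List.pyGetD a 0 0 := rfl
    rw [hx] at h ⊢
    clear hx
    match a, h1 with
    | [x], _ =>
      simp only [PySem.List.pyGetD_zero_cons] at h
      simp [signedSum, h]
  | case3 a h0 h1 xx h =>
    have hx : xx = PySem.List.pyGetD a 0 0 := rfl
    rw [hx] at h ⊢
    clear hx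
    match a, h1 with
    | [x], _ =>
      simp only [PySem.List.pyGetD_zero_cons] at h
      simp [signedSum, h]
  | case4 a h0 h1 mid ih2 ih1 =>
    have hm : mid = PySem.Int.floordiv (PySem.List.len a) 2 := rfl
    have hk : (0:Int) ≤ mid := by
      rw [hm]
      simp [PySem.List.len_eq]
      positivity
    rw [ih2, ih1, signedSum_slice_split m mid a hk]

-- ===== VERDICT =====
theorem dnd_spec : Claim_equal_dnd := by
  intro n m a _ _
  unfold Spec_dnd dnd
  rw [dnd_alt_eq_signedSum]
  simpa using dnd_foldl_inv m a 0 0
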